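-- pv_equiv track=rewrite | github.com/HewlettPackard/green-dcc | utils/utils_cf.py | generate_node_connections
-- ===== SOURCE A (Python) =====
-- from itertools import combinations
--
-- def generate_node_connections(N, E):
--     if len(E) != (len(N) * (len(N) - 1)) // 2:
--         raise ValueError("The number of edges doesn't match the number of node pairs")
--
--     # Dictionary to hold the connections for each node
--     node_connections = {node: [] for node in N}
--
--     # Generate all combinations of node pairs
--     node_pairs = list(combinations(N, 2))
--
--     # Iterate over edges and populate the dictionary
--     for idx, (n1, n2) in enumerate(node_pairs):
--         # Add the edge weight to the corresponding nodes
--         node_connections[n1].append((n2, E[idx]))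
--         node_connections[n2].append((n1, E[idx]))
--
--     return node_connections
-- ===== SOURCE B (Python) =====
-- from itertools import combinations
--
-- def generate_node_connections(N, E):
--     if len(E) != (len(N) * (len(N) - 1)) // 2:
--         raise ValueError("The number of edges doesn't match the number of node pairs")
--
--     def incident(node):
--         # All edges touching `node`, in edge order.
--         out = []
--         for (a, b), w in zip(combinations(N, 2), E):
--             if a == node:
--                 out.append((b, w))
--             if b == node:
--                 out.append((a, w))
--         return out
--
--     return {node: incident(node) for node in N}
-- ===== Notes on version B (the rewrite author's own statement) =====
-- stated objective: alternative
-- what changed: Replaces A's single scatter pass that dual-appends each edge into a dict of per-node lists by a gather formulation: for each node, one pass over zip(combinations(N,2), E) collects the edges incident to it; the dict-of-lists accumulator disappears.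
import Mathlib
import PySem

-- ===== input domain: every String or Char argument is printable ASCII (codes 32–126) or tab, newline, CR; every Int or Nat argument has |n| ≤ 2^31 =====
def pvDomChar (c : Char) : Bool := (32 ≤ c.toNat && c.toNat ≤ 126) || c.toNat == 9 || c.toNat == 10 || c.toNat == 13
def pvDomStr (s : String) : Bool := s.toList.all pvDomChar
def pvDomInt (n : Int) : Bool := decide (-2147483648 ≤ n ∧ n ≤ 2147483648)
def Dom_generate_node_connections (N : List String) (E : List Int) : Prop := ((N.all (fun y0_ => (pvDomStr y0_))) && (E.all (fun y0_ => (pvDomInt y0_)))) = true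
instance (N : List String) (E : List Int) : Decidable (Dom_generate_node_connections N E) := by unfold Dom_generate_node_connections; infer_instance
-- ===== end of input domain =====

-- B gathers each node's incident edges by a per-node pass over the zipped edge list,
-- instead of A's single scatter pass dual-appending into a dict of lists (alternative decomposition).

-- ===== PORT A =====
-- itertools.combinations(N, 2), ported by hand (standard recursive semantics of combinations of size 2 as pairs)
def pyCombos2 : List String → List (String × String)
  | [] => []
  | x :: xs => xs.map (fun y => (x, y)) ++ pyCombos2 xs

def generate_node_connections (N : List String) (E : List Int) : List (String × List (String × Int)) :=
  if E.length ≠ N.length * (N.length - 1) / 2 then []   -- raise ValueError (excluded by Pre_)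
  else
    let node_connections : PySem.Dict String (List (String × Int)) :=
      N.foldl (fun d node => d.insert node []) PySem.Dict.empty
    let node_pairs := pyCombos2 N
    let d := (PySem.List.enumerate node_pairs).foldl
      (fun d ip =>
        (d.modify ip.2.1 [] (fun l => l ++ [(ip.2.2, PySem.List.pyGetD E ip.1 0)])).modify
          ip.2.2 [] (fun l => l ++ [(ip.2.1, PySem.List.pyGetD E ip.1 0)]))
      node_connections
    d.items

-- ===== PORT B =====
def incidentB (N : List String) (E : List Int) (node : String) : List (String × Int) :=
  ((pyCombos2 N).zip E).foldl
    (fun out pw =>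
      let out := if pw.1.1 == node then out ++ [(pw.1.2, pw.2)] else out
      if pw.1.2 == node then out ++ [(pw.1.1, pw.2)] else out)
    []

def generate_node_connections_alt (N : List String) (E : List Int) : List (String × List (String × Int)) :=
  if E.length ≠ N.length * (N.length - 1) / 2 then []   -- raise ValueError (excluded by Pre_)
  else
    (N.foldl (fun d node => d.insert node (incidentB N E node)) PySem.Dict.empty).items

-- ===== PRECONDITION & SPEC =====
-- Pre_ excludes exactly the inputs whose edge count differs from n*(n-1)//2, on which
-- A (and B) raises ValueError.
def Pre_generate_node_connections (N : List String) (E : List Int) : Prop :=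
  E.length = N.length * (N.length - 1) / 2
instance (N : List String) (E : List Int) : Decidable (Pre_generate_node_connections N E) := by
  unfold Pre_generate_node_connections; infer_instance

def pvWitness_generate_node_connections : List String × List Int := (["a", "b", "c"], [1, 2, 3])

def Spec_generate_node_connections (N : List String) (E : List Int) (out : List (String × List (String × Int))) : Prop := out = generate_node_connections_alt N E
instance (N : List String) (E : List Int) (out : List (String × List (String × Int))) : Decidable (Spec_generate_node_connections N E out) := by unfold Spec_generate_node_connections; infer_instance

-- ===== CLAIM (what is proved, stated in full; the proofs are below) =====
def Claim_equal_generate_node_connections : Prop := ∀ (N : List String) (E : List Int), Dom_generate_node_connections N E → Pre_generate_node_connections N E → Spec_generate_node_connections N E (generate_node_connections N E)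

-- ===== LEMMAS AND PROOFS =====

-- edge weight by flat index
def wE (E : List Int) (t : Int) : Int := PySem.List.pyGetD E t 0

-- the two dict writes of A's loop body for the pair (x, y) with flat index o
def starOps (E : List Int) (x : String) : Int → List String → List (String × (String × Int))
  | _, [] => []
  | o, y :: ys => (x, (y, wE E o)) :: (y, (x, wE E o)) :: starOps E x (o + 1) ys

-- all writes of A's loop, in execution order, starting at flat index o
def opsR (E : List Int) : Int → List String → List (String × (String × Int))
  | _, [] => []
  | o, x :: xs => starOps E x o xs ++ opsR E (o + (xs.length : Int)) xs

def expandOp (E : List Int) (ip : Int × (String × String)) : List (String × (String × Int)) :=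
  [(ip.2.1, (ip.2.2, wE E ip.1)), (ip.2.2, (ip.2.1, wE E ip.1))]

lemma foldl_step2_eq_flat (E : List Int) (l : List (Int × (String × String)))
    (d : PySem.Dict String (List (String × Int))) :
    l.foldl (fun d ip =>
        (d.modify ip.2.1 [] (fun l => l ++ [(ip.2.2, PySem.List.pyGetD E ip.1 0)])).modify
          ip.2.2 [] (fun l => l ++ [(ip.2.1, PySem.List.pyGetD E ip.1 0)])) d
    = (l.flatMap (expandOp E)).foldl (fun d p => d.modify p.1 [] (fun l => l ++ [p.2])) d := by
  induction l generalizing d with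
  | nil => rfl
  | cons ip t ih =>
    simp only [List.foldl_cons, List.flatMap_cons, expandOp, List.foldl_append, wE, ih, List.foldl_nil]

lemma enumerate_star (E : List Int) (x : String) :
    ∀ (ys : List String) (o : Int),
      (PySem.List.enumerate (ys.map (fun y => (x, y))) o).flatMap (expandOp E) = starOps E x o ys := by
  intro ys
  induction ys with
  | nil => intro o; simp [PySem.List.enumerate_nil, starOps]
  | cons y ys ih =>
    intro o
    simp only [List.map_cons, PySem.List.enumerate_cons, List.flatMap_cons, ih, starOps, expandOp]
    rfl

lemma enumerate_combos (E : List Int) :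
    ∀ (N : List String) (o : Int),
      (PySem.List.enumerate (pyCombos2 N) o).flatMap (expandOp E) = opsR E o N := by
  intro N
  induction N with
  | nil => intro o; simp [pyCombos2, PySem.List.enumerate_nil, opsR]
  | cons x xs ih =>
    intro o
    simp only [pyCombos2, PySem.List.enumerate_append, List.flatMap_append, opsR,
      enumerate_star, ih, List.length_map]

lemma getD_foldl_insert_nil (c : String) :
    ∀ (M : List String) (d : PySem.Dict String (List (String × Int))),
      (∀ k, d.getD k [] = []) →
      (M.foldl (fun d x => d.insert x []) d).getD c [] = [] := by
  intro M
  induction M with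
  | nil => intro d h; exact h c
  | cons x xs ih =>
    intro d h
    refine ih _ (fun k => ?_)
    rw [PySem.Dict.getD_insert]
    split
    · rfl
    · exact h k

lemma mem_starOps_fst (E : List Int) (x : String) :
    ∀ (ys : List String) (o : Int) (p : String × (String × Int)),
      p ∈ starOps E x o ys → p.1 = x ∨ p.1 ∈ ys := by
  intro ys
  induction ys with
  | nil => intro o p h; simp [starOps] at h
  | cons y ys ih =>
    intro o p h
    simp only [starOps, List.mem_cons] at h
    rcases h with h | h | h
    · subst h; exact Or.inl rfl
    · subst h; simp
    · rcases ih _ _ h with h' | h'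
      · exact Or.inl h'
      · simp [h']

lemma mem_opsR_fst (E : List Int) :
    ∀ (M : List String) (o : Int) (p : String × (String × Int)),
      p ∈ opsR E o M → p.1 ∈ M := by
  intro M
  induction M with
  | nil => intro o p h; simp [opsR] at h
  | cons x xs ih =>
    intro o p h
    simp only [opsR, List.mem_append] at h
    rcases h with h | h
    · rcases mem_starOps_fst E x xs o p h with h' | h'
      · simp [h']
      · simp [h']
    · simp [ih _ _ h]

lemma getD_foldl_insert_val (v : String → List (String × Int)) (c : String) :
    ∀ (M : List String) (d : PySem.Dict String (List (String × Int))),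
      (M.foldl (fun d a => d.insert a (v a)) d).getD c []
        = if c ∈ M then v c else d.getD c [] := by
  intro M
  induction M with
  | nil => intro d; simp
  | cons a M ih =>
    intro d
    rw [List.foldl_cons, ih]
    by_cases hcM : c ∈ M
    · simp [hcM]
    · by_cases hca : c = a
      · subst hca; simp [hcM]
      · simp [hcM, hca, PySem.Dict.getD_insert]

lemma len_pyCombos2 : ∀ (N : List String), 2 * (pyCombos2 N).length = N.length * (N.length - 1) := by
  intro N
  induction N with
  | nil => rfl
  | cons x xs ih =>
    simp only [pyCombos2, List.length_append, List.length_map, List.length_cons]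
    cases xs with
    | nil => rfl
    | cons y ys =>
      simp only [List.length_cons, Nat.add_sub_cancel] at ih ⊢
      nlinarith [ih]

-- zip with E is enumerate + indexing when E is long enough
lemma zip_eq_enumerate_wE (E : List Int) :
    ∀ (ps : List (String × String)) (o : Nat), o + ps.length ≤ E.length →
      ps.zip (E.drop o) = (PySem.List.enumerate ps (o : Int)).map (fun ip => (ip.2, wE E ip.1)) := by
  intro ps
  induction ps with
  | nil => intro o h; simp [PySem.List.enumerate_nil]
  | cons p ps ih =>
    intro o h
    have ho : o < E.length := by simp at h; omega
    rw [List.drop_eq_getElem_cons ho]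
    simp only [List.zip_cons_cons, PySem.List.enumerate_cons, List.map_cons]
    have hw : wE E (o : Int) = E[o] := by
      simp [wE, PySem.List.pyGetD_natCast, List.getD_eq_getElem?_getD, List.getElem?_eq_getElem ho]
    have hcast : (o : Int) + 1 = ((o + 1 : Nat) : Int) := by push_cast; ring
    rw [hw, hcast, ← ih (o + 1) (by simp at h ⊢; omega)]

-- B's per-edge conditional appends, as a flatMap
lemma foldl_two_if (node : String) :
    ∀ (l : List ((String × String) × Int)) (acc : List (String × Int)),
      l.foldl (fun out pw =>
          let out := if pw.1.1 == node then out ++ [(pw.1.2, pw.2)] else out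
          if pw.1.2 == node then out ++ [(pw.1.1, pw.2)] else out) acc
      = acc ++ l.flatMap (fun pw =>
          (if pw.1.1 == node then [(pw.1.2, pw.2)] else [])
            ++ (if pw.1.2 == node then [(pw.1.1, pw.2)] else [])) := by
  intro l
  induction l with
  | nil => intro acc; simp
  | cons pw t ih =>
    intro acc
    simp only [List.foldl_cons, List.flatMap_cons, ih]
    split_ifs <;> simp

-- the entries A's pair writes contribute to node, in order
lemma filter_expandOp (E : List Int) (node : String) (ip : Int × (String × String)) :
    ((expandOp E ip).filter (fun p => p.1 == node)).map (·.2)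
      = (if ip.2.1 == node then [(ip.2.2, wE E ip.1)] else [])
          ++ (if ip.2.2 == node then [(ip.2.1, wE E ip.1)] else []) := by
  simp only [expandOp, List.filter_cons, List.filter_nil]
  split_ifs <;> simp_all

-- B's gather per node = the writes of A's loop that hit that node, in order
lemma incidentB_eq_filter_opsR (N : List String) (E : List Int)
    (hlen : E.length = N.length * (N.length - 1) / 2) (node : String) :
    incidentB N E node = ((opsR E 0 N).filter (fun p => p.1 == node)).map (·.2) := by
  have h2 := len_pyCombos2 N
  have hle : 0 + (pyCombos2 N).length ≤ E.length := by omega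
  have hz := zip_eq_enumerate_wE E (pyCombos2 N) 0 hle
  rw [List.drop_zero] at hz
  unfold incidentB
  rw [hz, foldl_two_if, List.nil_append, ← enumerate_combos E N 0, List.filter_flatMap,
    List.map_flatMap, List.flatMap_map]
  apply List.flatMap_congr
  intro ip _
  exact (filter_expandOp E node ip).symm

-- ===== VERDICT (by name: the statement is the Claim_ definition above) =====
theorem generate_node_connections_spec : Claim_equal_generate_node_connections := by
  intro N E _ hlen
  unfold Pre_generate_node_connections at hlen
  unfold Spec_generate_node_connections generate_node_connections generate_node_connections_alt
  rw [if_neg (fun hc => hc hlen), if_neg (fun hc => hc hlen)]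
  dsimp only
  -- A side: characterise the dict built by the edge loop
  rw [foldl_step2_eq_flat, enumerate_combos]
  set d0 : PySem.Dict String (List (String × Int)) :=
    N.foldl (fun d node => d.insert node []) PySem.Dict.empty with hd0
  set dA := (opsR E 0 N).foldl (fun d p => d.modify p.1 [] (fun l => l ++ [p.2])) d0 with hdA
  have hd0getD : ∀ c, d0.getD c [] = [] := by
    intro c
    exact getD_foldl_insert_nil c N PySem.Dict.empty (fun k => PySem.Dict.getD_empty k [])
  have hd0keys : d0.keys = PySem.Set.ofList N := by
    rw [hd0, PySem.Dict.keys_foldl_insert N (fun _ _ => []) PySem.Dict.empty,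
      PySem.Dict.keys_empty, PySem.Set.update_nil_left]
  have hAkeys : dA.keys = PySem.Set.ofList N := by
    rw [hdA, PySem.Dict.keys_foldl_modify_key (opsR E 0 N) (fun p => p.1) []
        (fun _ p => fun l => l ++ [p.2]) d0, hd0keys]
    rw [PySem.Set.update_eq_append_filter]
    have hfil : List.filter (fun y => !PySem.Set.contains (PySem.Set.ofList N) y)
        (PySem.Set.ofList ((opsR E 0 N).map (fun p => p.1))) = [] := by
      apply List.filter_eq_nil_iff.mpr
      intro y hy
      have hyN : y ∈ N := by
        have := (PySem.Set.mem_ofList _ y).mp hy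
        obtain ⟨p, hp, hpy⟩ := List.mem_map.mp this
        exact hpy ▸ mem_opsR_fst E N 0 p hp
      have : y ∈ PySem.Set.ofList N := (PySem.Set.mem_ofList N y).mpr hyN
      simpa [PySem.Set.contains] using this
    rw [hfil]
    simp
  have hAnodup : dA.keys.Nodup := hAkeys ▸ PySem.Set.nodup_ofList N
  have hAitems : dA.items = (PySem.Set.ofList N).map (fun c => (c, dA.getD c [])) := by
    rw [PySem.Dict.items_eq_map_keys dA hAnodup [], hAkeys]
  have hAgetD : ∀ c, dA.getD c []
      = ((opsR E 0 N).filter (fun p => p.1 == c)).map (·.2) := by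
    intro c
    rw [hdA, PySem.Dict.getD_foldl_modify_append (opsR E 0 N) d0 c, hd0getD]
    simp
  -- B side: the per-node insert loop
  set dB := N.foldl (fun d node => d.insert node (incidentB N E node)) PySem.Dict.empty with hdB
  have hBkeys : dB.keys = PySem.Set.ofList N := by
    rw [hdB, PySem.Dict.keys_foldl_insert N (fun _ a => incidentB N E a) PySem.Dict.empty,
      PySem.Dict.keys_empty, PySem.Set.update_nil_left]
  have hBnodup : dB.keys.Nodup := hBkeys ▸ PySem.Set.nodup_ofList N
  have hBitems : dB.items = (PySem.Set.ofList N).map (fun c => (c, dB.getD c [])) := by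
    rw [PySem.Dict.items_eq_map_keys dB hBnodup [], hBkeys]
  have hBgetD : ∀ c, c ∈ N → dB.getD c [] = incidentB N E c := by
    intro c hc
    rw [hdB, getD_foldl_insert_val (incidentB N E) c N PySem.Dict.empty, if_pos hc]
  rw [hAitems, hBitems]
  apply List.map_congr_left
  intro c hc
  have hcN : c ∈ N := (PySem.Set.mem_ofList N c).mp hc
  congr 1
  rw [hAgetD, hBgetD c hcN, incidentB_eq_filter_opsR N E hlen c]
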